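-- pv_equiv track=rewrite | github.com/tomerfry/binteractiview | bintv/alignment.py | find_continuous_segments
-- ===== SOURCE A (Python) =====
-- def find_continuous_segments(aligned_seq1, aligned_seq2, min_length=4):
--     """
--     Find continuous segments (no gaps) in the aligned sequences.
--
--     Args:
--         aligned_seq1: First aligned sequence
--         aligned_seq2: Second aligned sequence
--         min_length: Minimum length of segments to consider
--
--     Returns:
--         List of segments with their start positions and lengths
--     """
--     segments = []
--     current_segment_start = None
--     current_segment_length = 0
--
--     for i in range(len(aligned_seq1)):
--         if aligned_seq1[i] is not None and aligned_seq2[i] is not None: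
--             # Continuous segment (no gaps)
--             if current_segment_start is None:
--                 current_segment_start = i
--             current_segment_length += 1
--         else:
--             # Gap detected, check if current segment is long enough
--             if current_segment_length >= min_length:
--                 segments.append((current_segment_start, current_segment_length))
--             current_segment_start = None
--             current_segment_length = 0
--
--     # Check the last segment
--     if current_segment_length >= min_length:
--         segments.append((current_segment_start, current_segment_length))
--
--     return segments
-- ===== SOURCE B (Python) =====
-- def find_continuous_segments(aligned_seq1, aligned_seq2, min_length=4):
--     n = len(aligned_seq1)
--     mask = [aligned_seq1[i] is not None and aligned_seq2[i] is not None
--             for i in range(n)]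
--     segments = []
--     i = 0
--     while i < n:
--         j = i + 1
--         while j < n and mask[j] == mask[i]:
--             j += 1
--         if mask[i] and j - i >= min_length:
--             segments.append((i, j - i))
--         i = j
--     return segments
-- ===== Notes on version B (the rewrite author's own statement) =====
-- stated objective: alternative
-- what changed: Replaces A's incremental one-element-at-a-time state machine (current start / current length carried across the loop) by first precomputing a boolean gap-free mask and then scanning it run by run (group-then-filter over consecutive runs).
-- outside the precondition, e.g. on find_continuous_segments([None], [None], 0): A returns [(None, 0), (None, 0)], B returns []
import Mathlib
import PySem

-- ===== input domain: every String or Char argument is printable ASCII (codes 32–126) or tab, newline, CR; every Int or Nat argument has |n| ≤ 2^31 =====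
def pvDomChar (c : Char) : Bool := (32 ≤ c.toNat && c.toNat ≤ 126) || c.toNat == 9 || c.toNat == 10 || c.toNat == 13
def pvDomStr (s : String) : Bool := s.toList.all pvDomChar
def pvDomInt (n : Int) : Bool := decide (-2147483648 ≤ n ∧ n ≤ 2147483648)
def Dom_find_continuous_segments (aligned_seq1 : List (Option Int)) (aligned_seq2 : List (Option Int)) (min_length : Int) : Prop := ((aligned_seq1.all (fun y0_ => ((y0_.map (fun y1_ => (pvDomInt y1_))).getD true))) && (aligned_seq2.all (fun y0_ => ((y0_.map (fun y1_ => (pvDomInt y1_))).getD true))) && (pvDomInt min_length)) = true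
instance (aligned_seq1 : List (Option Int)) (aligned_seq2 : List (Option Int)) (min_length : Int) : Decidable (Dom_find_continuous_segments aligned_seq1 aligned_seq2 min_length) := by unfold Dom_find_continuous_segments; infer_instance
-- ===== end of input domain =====

-- B replaces A's incremental state machine by a precomputed gap-free mask scanned run by run
-- (group-then-filter over consecutive runs); same O(n) cost, different decomposition.

-- ===== PORT A =====
-- Python's current_segment_start is Optional; whenever A appends it under Pre_ it is set,
-- so the `.getD 0` below is only reachable outside Pre_.
def find_continuous_segments (aligned_seq1 : List (Option Int)) (aligned_seq2 : List (Option Int)) (min_length : Int) : List (Int × Int) :=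
  let r := (PySem.List.pyRange 0 (aligned_seq1.length : Int) 1).foldl
    (fun (st : List (Int × Int) × Option Int × Int) i =>
      if (PySem.List.pyGet? aligned_seq1 i).getD none ≠ none ∧ (PySem.List.pyGet? aligned_seq2 i).getD none ≠ none then
        (st.1, (match st.2.1 with | none => some i | some s => some s), st.2.2 + 1)
      else
        ((if st.2.2 ≥ min_length then st.1 ++ [(st.2.1.getD 0, st.2.2)] else st.1), none, 0))
    ([], none, 0)
  if r.2.2 ≥ min_length then r.1 ++ [(r.2.1.getD 0, r.2.2)] else r.1

-- ===== PORT B =====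
-- run scan over the mask: the inner `while` loop of Source B counting equal neighbours is the takeWhile
def pvRuns (min_length : Int) : List Bool → Int → List (Int × Int)
  | [], _ => []
  | b :: bs, i =>
    let t := (bs.takeWhile (fun x => x == b)).length
    let rest := pvRuns min_length (bs.drop t) (i + 1 + (t : Int))
    if b = true ∧ 1 + (t : Int) ≥ min_length then (i, 1 + (t : Int)) :: rest else rest
  termination_by l _ => l.length
  decreasing_by simp

def find_continuous_segments_alt (aligned_seq1 : List (Option Int)) (aligned_seq2 : List (Option Int)) (min_length : Int) : List (Int × Int) :=
  let mask := (PySem.List.pyRange 0 (aligned_seq1.length : Int) 1).map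
    (fun i => decide ((PySem.List.pyGet? aligned_seq1 i).getD none ≠ none ∧ (PySem.List.pyGet? aligned_seq2 i).getD none ≠ none))
  pvRuns min_length mask 0

-- ===== PRECONDITION & SPEC =====
-- Pre_ excludes (a) aligned_seq2 shorter than aligned_seq1, where A raises IndexError, and
-- (b) min_length ≤ 0 except when both sequences are gap-free and non-empty: there A appends
-- (None, 0) pairs, a value outside the declared List (Int × Int) type.
def Pre_find_continuous_segments (aligned_seq1 : List (Option Int)) (aligned_seq2 : List (Option Int)) (min_length : Int) : Prop :=
  aligned_seq1.length ≤ aligned_seq2.length ∧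
  (1 ≤ min_length ∨
    (aligned_seq1 ≠ [] ∧ aligned_seq1.all (fun o => o.isSome) = true ∧
      (aligned_seq2.take aligned_seq1.length).all (fun o => o.isSome) = true))
instance (aligned_seq1 : List (Option Int)) (aligned_seq2 : List (Option Int)) (min_length : Int) : Decidable (Pre_find_continuous_segments aligned_seq1 aligned_seq2 min_length) := by unfold Pre_find_continuous_segments; infer_instance

def pvWitness_find_continuous_segments : List (Option Int) × List (Option Int) × Int :=
  ([some 1, none, some 2, some 3], [some 0, some 5, some 6, some 7], 2)

def Spec_find_continuous_segments (aligned_seq1 : List (Option Int)) (aligned_seq2 : List (Option Int)) (min_length : Int) (out : List (Int × Int)) : Prop := out = find_continuous_segments_alt aligned_seq1 aligned_seq2 min_length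
instance (aligned_seq1 : List (Option Int)) (aligned_seq2 : List (Option Int)) (min_length : Int) (out : List (Int × Int)) : Decidable (Spec_find_continuous_segments aligned_seq1 aligned_seq2 min_length out) := by unfold Spec_find_continuous_segments; infer_instance

-- ===== CLAIM (what is proved, stated in full; the proofs are below) =====
def Claim_equal_find_continuous_segments : Prop := ∀ (aligned_seq1 : List (Option Int)) (aligned_seq2 : List (Option Int)) (min_length : Int), Dom_find_continuous_segments aligned_seq1 aligned_seq2 min_length → Pre_find_continuous_segments aligned_seq1 aligned_seq2 min_length → Spec_find_continuous_segments aligned_seq1 aligned_seq2 min_length (find_continuous_segments aligned_seq1 aligned_seq2 min_length)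

-- ===== LEMMAS AND PROOFS =====

-- A's loop body, named for the proofs (identical to the lambda in the port)
def pvStep (s1 s2 : List (Option Int)) (m : Int) (st : List (Int × Int) × Option Int × Int) (i : Int) : List (Int × Int) × Option Int × Int :=
  if (PySem.List.pyGet? s1 i).getD none ≠ none ∧ (PySem.List.pyGet? s2 i).getD none ≠ none then
    (st.1, (match st.2.1 with | none => some i | some s => some s), st.2.2 + 1)
  else
    ((if st.2.2 ≥ m then st.1 ++ [(st.2.1.getD 0, st.2.2)] else st.1), none, 0)

def pvPred (s1 s2 : List (Option Int)) (i : Int) : Bool :=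
  decide ((PySem.List.pyGet? s1 i).getD none ≠ none ∧ (PySem.List.pyGet? s2 i).getD none ≠ none)

-- A's state machine, driven by the mask instead of the sequences
def pvRunA (m : Int) : (List (Int × Int) × Option Int × Int) → Int → List Bool → (List (Int × Int) × Option Int × Int)
  | st, _, [] => st
  | st, i, b :: bs =>
    if b then pvRunA m (st.1, (match st.2.1 with | none => some i | some s => some s), st.2.2 + 1) (i + 1) bs
    else pvRunA m ((if st.2.2 ≥ m then st.1 ++ [(st.2.1.getD 0, st.2.2)] else st.1), none, 0) (i + 1) bs

-- A's trailing-segment flush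
def pvFin (m : Int) (st : List (Int × Int) × Option Int × Int) : List (Int × Int) :=
  if st.2.2 ≥ m then st.1 ++ [(st.2.1.getD 0, st.2.2)] else st.1

lemma pv_bridge (s1 s2 : List (Option Int)) (m : Int) :
    ∀ (k : Nat) (a : Int) (st : List (Int × Int) × Option Int × Int),
      (PySem.List.pyRange a (a + k) 1).foldl (pvStep s1 s2 m) st
        = pvRunA m st a ((PySem.List.pyRange a (a + k) 1).map (pvPred s1 s2)) := by
  intro k
  induction k with
  | zero =>
    intro a st
    simp [PySem.List.pyRange_one_eq_nil (le_refl a), pvRunA]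
  | succ k ih =>
    intro a st
    have hcons : PySem.List.pyRange a (a + (k + 1 : Nat)) 1
        = a :: PySem.List.pyRange (a + 1) (a + (k + 1 : Nat)) 1 := by
      apply PySem.List.pyRange_one_cons; push_cast; omega
    have harg : a + ((k + 1 : Nat) : Int) = (a + 1) + (k : Int) := by push_cast; ring
    rw [hcons, List.foldl_cons, List.map_cons]
    by_cases h : (PySem.List.pyGet? s1 a).getD none ≠ none ∧ (PySem.List.pyGet? s2 a).getD none ≠ none
    · simp only [pvRunA, pvPred]
      rw [harg] at *
      simpa [pvStep, h] using ih (a + 1) _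
    · simp only [pvRunA, pvPred, h, decide_false, Bool.false_eq_true, if_false]
      rw [harg] at *
      simpa [pvStep, h] using ih (a + 1) _

lemma pv_runs_false (m : Int) : ∀ (cs : List Bool) (j : Int),
    pvRuns m (false :: cs) j = pvRuns m cs (j + 1) := by
  intro cs j
  match cs with
  | [] => simp [pvRuns]
  | true :: cs' => simp [pvRuns]
  | false :: cs' =>
    have h : List.takeWhile (fun x => x == false) (false :: cs')
        = false :: List.takeWhile (fun x => x == false) cs' := by simp
    simp only [pvRuns, h, List.length_cons, List.drop_succ_cons]
    norm_num
    congr 1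
    ring

lemma pv_main (m : Int) (hm : 1 ≤ m) : ∀ (n : Nat) (mask : List Bool), mask.length ≤ n →
    (∀ (segs : List (Int × Int)) (i : Int),
      pvFin m (pvRunA m (segs, none, 0) i mask) = segs ++ pvRuns m mask i) ∧
    (∀ (segs : List (Int × Int)) (s c i : Int),
      pvFin m (pvRunA m (segs, some s, c) i mask) =
        segs ++ ((if c + ((mask.takeWhile (fun x => x == true)).length : Int) ≥ m then
                    [(s, c + ((mask.takeWhile (fun x => x == true)).length : Int))] else [])
          ++ pvRuns m (mask.drop (mask.takeWhile (fun x => x == true)).length)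
               (i + ((mask.takeWhile (fun x => x == true)).length : Int)))) := by
  intro n
  induction n with
  | zero =>
    intro mask hlen
    have hnil : mask = [] := List.eq_nil_of_length_eq_zero (Nat.le_zero.mp hlen)
    subst hnil
    have h0 : ¬ ((0 : Int) ≥ m) := by omega
    constructor
    · intro segs i
      simp [pvRunA, pvRuns, pvFin, h0]
    · intro segs s c i
      simp only [pvRunA, pvRuns, pvFin, List.takeWhile_nil, List.length_nil,
        Nat.cast_zero, add_zero, List.drop_nil]
      split_ifs <;> simp
  | succ n ih =>
    intro mask hlen
    match mask with
    | [] => exact ih [] (Nat.zero_le n)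
    | b :: bs =>
      have hbs : bs.length ≤ n := by simpa using hlen
      obtain ⟨ihL, ihR⟩ := ih bs hbs
      have h0 : ¬ ((0 : Int) ≥ m) := by omega
      constructor
      · intro segs i
        cases b
        · simp only [pvRunA, Bool.false_eq_true, if_false]
          rw [pv_runs_false]
          simpa [h0] using ihL segs (i + 1)
        · simp only [pvRunA, if_true, zero_add]
          rw [ihR segs i 1 (i + 1)]
          simp only [pvRuns]
          split_ifs with h1 h2 h3
          · simp
          · exact absurd ⟨trivial, h1⟩ h2
          · exact absurd h3.2 h1
          · simp
      · intro segs s c i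
        cases b
        · simp only [pvRunA, Bool.false_eq_true, if_false]
          have htw : List.takeWhile (fun x => x == true) (false :: bs)
              = [] := by simp
          rw [htw]
          simp only [List.length_nil, Nat.cast_zero, add_zero, List.drop_zero]
          rw [pv_runs_false]
          rw [show ((some s : Option Int).getD 0) = s from rfl]
          rw [ihL (if c ≥ m then segs ++ [(s, c)] else segs) (i + 1)]
          split_ifs <;> simp
        · simp only [pvRunA, if_true]
          rw [ihR segs s (c + 1) (i + 1)]
          have htw : List.takeWhile (fun x => x == true) (true :: bs)
              = true :: List.takeWhile (fun x => x == true) bs := by simp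
          rw [htw]
          simp only [List.length_cons, List.drop_succ_cons]
          have e1 : c + ((List.takeWhile (fun x => x == true) bs).length + 1 : Nat)
              = c + 1 + ((List.takeWhile (fun x => x == true) bs).length : Int) := by
            push_cast; ring
          have e2 : i + ((List.takeWhile (fun x => x == true) bs).length + 1 : Nat)
              = i + 1 + ((List.takeWhile (fun x => x == true) bs).length : Int) := by
            push_cast; ring
          rw [e1, e2]

lemma pv_runA_trues (m : Int) : ∀ (k : Nat) (segs : List (Int × Int)) (s c : Int) (i : Int),
    pvRunA m (segs, some s, c) i (List.replicate k true) = (segs, some s, c + k) := by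
  intro k
  induction k with
  | zero => intro segs s c i; simp [pvRunA]
  | succ k ih =>
    intro segs s c i
    rw [List.replicate_succ]
    simp only [pvRunA, if_true]
    rw [ih]
    have e : c + 1 + (k : Int) = c + ((k + 1 : Nat) : Int) := by push_cast; ring
    rw [e]

lemma pv_mask_true (s1 s2 : List (Option Int)) (hlen : s1.length ≤ s2.length)
    (h1 : s1.all (fun o => o.isSome) = true)
    (h2 : (s2.take s1.length).all (fun o => o.isSome) = true) :
    (PySem.List.pyRange 0 (s1.length : Int) 1).map (pvPred s1 s2)
      = List.replicate s1.length true := by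
  refine List.eq_replicate_iff.mpr ⟨?_, ?_⟩
  · simp [PySem.List.length_pyRange_one]
  · intro b hb
    obtain ⟨i, hi, rfl⟩ := List.mem_map.mp hb
    obtain ⟨hi0, hin⟩ := (PySem.List.mem_pyRange_one).mp hi
    have hnat : i.toNat < s1.length := by omega
    have hnat2 : i.toNat < s2.length := by omega
    simp only [pvPred, decide_eq_true_iff]
    constructor
    · rw [PySem.List.pyGet?_eq_some_getElem (xs := s1) (i := i) hi0 hin]
      have := (List.all_eq_true.mp h1) _ (s1.getElem_mem hnat)
      simpa [Option.getD] using Option.ne_none_iff_isSome.mpr this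
    · rw [PySem.List.pyGet?_eq_some_getElem (xs := s2) (i := i) hi0 (by omega)]
      have hlt : i.toNat < (s2.take s1.length).length := by
        simp only [List.length_take]
        omega
      have hmem : s2[i.toNat] ∈ s2.take s1.length := by
        have := List.getElem_mem hlt
        rwa [List.getElem_take] at this
      have := (List.all_eq_true.mp h2) _ hmem
      simpa [Option.getD] using Option.ne_none_iff_isSome.mpr this

lemma pv_runs_trues (m : Int) (k : Nat) (j : Int) :
    pvRuns m (true :: List.replicate k true) j
      = if 1 + (k : Int) ≥ m then [(j, 1 + (k : Int))] else [] := by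
  have ht : List.takeWhile (fun x => x == true) (List.replicate k true)
      = List.replicate k true := by
    simp
  simp only [pvRuns, ht, List.length_replicate, List.drop_replicate, Nat.sub_self,
    List.replicate_zero]
  split_ifs <;> simp_all

-- ===== VERDICT (by name: the statement is the Claim_ definition above) =====
theorem find_continuous_segments_spec : Claim_equal_find_continuous_segments := by
  intro s1 s2 m _ hpre
  obtain ⟨hlen, hrest⟩ := hpre
  show find_continuous_segments s1 s2 m = find_continuous_segments_alt s1 s2 m
  have hb := pv_bridge s1 s2 m s1.length 0 ([], none, 0)
  rw [zero_add] at hb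
  have hA : find_continuous_segments s1 s2 m
      = pvFin m (pvRunA m ([], none, 0) 0
          ((PySem.List.pyRange 0 (s1.length : Int) 1).map (pvPred s1 s2))) := by
    show pvFin m ((PySem.List.pyRange 0 (s1.length : Int) 1).foldl (pvStep s1 s2 m) ([], none, 0)) = _
    rw [hb]
  have hB : find_continuous_segments_alt s1 s2 m
      = pvRuns m ((PySem.List.pyRange 0 (s1.length : Int) 1).map (pvPred s1 s2)) 0 := rfl
  rw [hA, hB]
  rcases hrest with hm | ⟨hne, h1, h2⟩
  · simpa using
      (pv_main m hm (((PySem.List.pyRange 0 (s1.length : Int) 1).map (pvPred s1 s2)).length)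
        _ le_rfl).1 [] 0
  · rw [pv_mask_true s1 s2 hlen h1 h2]
    obtain ⟨k, hk⟩ : ∃ k, s1.length = k + 1 :=
      ⟨s1.length - 1, by have := List.length_pos_of_ne_nil hne; omega⟩
    rw [hk, List.replicate_succ]
    rw [pv_runs_trues]
    simp only [pvRunA, if_true, zero_add]
    rw [pv_runA_trues]
    simp [pvFin]
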